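-- pv_equiv track=rewrite | github.com/Uklusi/AdventOfCode | 2024/17/AoC.py | check_head
-- ===== SOURCE A (Python) =====
-- from dataclasses import dataclass, field
--
-- @dataclass
-- class Interpreter:
--     a: int
--     b: int
--     c: int
--     tape: list[int]
--     i: int = field(default=0, init=False)
--
--     def step(self, skip_jump: bool = False) -> int | None:
--         if self.i + 1 > len(self.tape):
--             raise StopIteration()
--
--         def interpret_param(i: int):
--             match i:
--                 case 0 | 1 | 2 | 3:
--                     return i
--                 case 4:
--                     return self.a
--                 case 5:
--                     return self.b
--                 case 6:
--                     return self.c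
--                 case _:
--                     raise ValueError(f"Invalid combo param {i}")
--
--         opcode, param = self.tape[self.i : self.i + 2]
--         self.i += 2
--         match opcode:
--             case 0:
--                 self.a = self.a // 2 ** (interpret_param(param))
--             case 1:
--                 self.b = self.b ^ param
--             case 2:
--                 self.b = interpret_param(param) % 8
--             case 3:
--                 if self.a != 0 and not skip_jump:
--                     self.i = param
--             case 4:
--                 self.b = self.b ^ self.c
--             case 5:
--                 return interpret_param(param) % 8
--             case 6:
--                 self.b = self.a // 2 ** (interpret_param(param))
--             case 7:
--                 self.c = self.a // 2 ** (interpret_param(param))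
--
--     def run(self, skip_jump: bool = False):
--         ret: list[int] = []
--         try:
--             while True:
--                 r = self.step(skip_jump=skip_jump)
--                 if r is not None:
--                     ret.append(r)
--         except StopIteration:
--             return ret
--
-- def check_head(a: int, tape: list[int], head: list[int]) -> tuple[bool, int]:
--     if len(head) == 0:
--         return (True, a)
--     for i in range(8):
--         a1 = 8 * a + i
--         program = Interpreter(a1, 0, 0, tape=tape)
--         if program.run(skip_jump=True)[0] == head[-1]:
--             (r, newa) = check_head(a1, tape, head[:-1])
--             if r:
--                 return (True, newa)
--     return (False, -1)
-- ===== SOURCE B (Python) =====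
-- # BFS over levels: keep the ordered list of viable accumulators per digit of head,
-- # instead of A's depth-first recursion with early return; first survivor = A's answer.
--
-- def _combo(p, a, b, c):
--     if 0 <= p <= 3:
--         return p
--     if p == 4:
--         return a
--     if p == 5:
--         return b
--     if p == 6:
--         return c
--     raise ValueError(f"Invalid combo param {p}")
--
-- def _run(a, tape):
--     # one pass of the machine with jumps disabled; returns the output list
--     b = c = 0
--     out = []
--     prog = list(tape)
--     while len(prog) >= 2:
--         op, p = prog[0], prog[1]
--         prog = prog[2:]
--         if op == 0:
--             a = a // 2 ** _combo(p, a, b, c)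
--         elif op == 1:
--             b = b ^ p
--         elif op == 2:
--             b = _combo(p, a, b, c) % 8
--         elif op == 4:
--             b = b ^ c
--         elif op == 5:
--             out.append(_combo(p, a, b, c) % 8)
--         elif op == 6:
--             b = a // 2 ** _combo(p, a, b, c)
--         elif op == 7:
--             c = a // 2 ** _combo(p, a, b, c)
--     return out
--
-- def check_head(a, tape, head):
--     level = [a]
--     for t in reversed(head):
--         level = [8 * acc + i
--                  for acc in level
--                  for i in range(8)
--                  if _run(8 * acc + i, tape)[0] == t]
--     if level:
--         return (True, level[0])
--     return (False, -1)
-- ===== Notes on version B (the rewrite author's own statement) =====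
-- stated objective: alternative
-- what changed: check_head's depth-first recursion with early return is replaced by an iterative breadth-first scan that keeps, per digit of head (processed back to front), the ordered list of all still-viable accumulators and finally returns the first survivor; the interpreter loop is rewritten to consume the program two cells at a time instead of stepping an instruction pointer with exceptions.
-- outside the precondition, e.g. on check_head(-1, [0, 4, 5, 4], [0]): A returns (True, -8), B returns (True, -8); on check_head(0, [5, 7], [1]): A raises ValueError, B raises ValueError; on check_head(0, [0, 1], [1]): A raises IndexError, B raises IndexError
import Mathlib
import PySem

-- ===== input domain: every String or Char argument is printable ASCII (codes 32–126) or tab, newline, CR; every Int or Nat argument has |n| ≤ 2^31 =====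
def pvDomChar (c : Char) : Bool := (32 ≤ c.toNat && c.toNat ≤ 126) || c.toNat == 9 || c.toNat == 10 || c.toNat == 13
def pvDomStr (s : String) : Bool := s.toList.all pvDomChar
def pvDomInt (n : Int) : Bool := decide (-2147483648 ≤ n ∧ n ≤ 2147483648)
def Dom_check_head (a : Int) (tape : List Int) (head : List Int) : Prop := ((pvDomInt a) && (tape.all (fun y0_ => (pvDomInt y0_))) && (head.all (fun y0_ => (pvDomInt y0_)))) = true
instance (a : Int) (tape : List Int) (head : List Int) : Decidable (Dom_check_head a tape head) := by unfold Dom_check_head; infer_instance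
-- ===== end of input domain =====

-- B re-implements A's depth-first recursion as a breadth-first level scan (alternative
-- decomposition, same cost); equivalence is proved on the inputs where A returns and all
-- interpreter arithmetic stays on ints.

-- ===== PORT A =====
-- interpret_param of the Interpreter (none = ValueError)
def comboA (a b c p : Int) : Option Int :=
  if p = 0 ∨ p = 1 ∨ p = 2 ∨ p = 3 then some p
  else if p = 4 then some a
  else if p = 5 then some b
  else if p = 6 then some c
  else none

-- Python's 2 ** e: a float for e < 0 (none here; such inputs are outside Pre_)
def pow2A (e : Int) : Option Int := if e < 0 then none else some ((2:Int) ^ e.toNat)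

-- Interpreter.run(skip_jump=True): step loop over the instruction pointer i;
-- none = an exception other than StopIteration escapes run (ValueError / float arithmetic)
def runA (tape : List Int) (a b c : Int) (i : Nat) : Option (List Int) :=
  if _h : tape.length ≤ i then some []
  else
    match tape[i]?, tape[i+1]? with
    | some op, some p =>
      if op = 0 then
        match comboA a b c p with
        | none => none
        | some v =>
          match pow2A v with
          | none => none
          | some d => runA tape (PySem.Int.floordiv a d) b c (i+2)
      else if op = 1 then runA tape a (PySem.Int.bxor b p) c (i+2)
      else if op = 2 then
        match comboA a b c p with
        | none => none
        | some v => runA tape a (PySem.Int.mod v 8) c (i+2)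
      else if op = 3 then runA tape a b c (i+2)
      else if op = 4 then runA tape a (PySem.Int.bxor b c) c (i+2)
      else if op = 5 then
        match comboA a b c p with
        | none => none
        | some v => (runA tape a b c (i+2)).map (fun r => PySem.Int.mod v 8 :: r)
      else if op = 6 then
        match comboA a b c p with
        | none => none
        | some v =>
          match pow2A v with
          | none => none
          | some d => runA tape a (PySem.Int.floordiv a d) c (i+2)
      else if op = 7 then
        match comboA a b c p with
        | none => none
        | some v =>
          match pow2A v with
          | none => none
          | some d => runA tape a b (PySem.Int.floordiv a d) (i+2)
      else runA tape a b c (i+2)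
    | _, _ => none  -- odd tail: 'opcode, param = tape[i:i+2]' raises ValueError
termination_by tape.length - i
decreasing_by all_goals omega

mutual
-- check_head of A: DFS with early return; the for-loop is checkLoop over range(8)
def check_head (a : Int) (tape : List Int) (head : List Int) : Bool × Int :=
  if head.length = 0 then (true, a)
  else checkLoop a tape head (PySem.List.pyRange 0 8 1)
termination_by (head.length, 9)
decreasing_by
  simp [Prod.lex_iff, PySem.List.length_pyRange_one]

def checkLoop (a : Int) (tape : List Int) (head : List Int) (cands : List Int) : Bool × Int :=
  match cands with
  | [] => (false, -1)
  | i :: rest =>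
    if hh : head = [] then (false, -1)  -- unreachable totality guard: checkLoop is only called with nonempty head
    else
      if ((runA tape (8*a+i) 0 0 0).bind fun r => PySem.List.pyGet? r 0) = PySem.List.pyGet? head (-1) then
        let p := check_head (8*a+i) tape (PySem.List.slice head none (some (-1)))
        if p.1 then (true, p.2) else checkLoop a tape head rest
      else checkLoop a tape head rest
termination_by (head.length, cands.length)
decreasing_by
  · simp only [PySem.List.slice_to_neg_one, Prod.lex_iff, List.length_dropLast]
    left
    have : head.length ≠ 0 := fun h => hh (List.eq_nil_of_length_eq_zero h)
    omega
  · simp [Prod.lex_iff]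
  · simp [Prod.lex_iff]
end

-- ===== PORT B =====
-- _combo of Source B (none = ValueError)
def comboB (p a b c : Int) : Option Int :=
  if 0 ≤ p ∧ p ≤ 3 then some p
  else if p = 4 then some a
  else if p = 5 then some b
  else if p = 6 then some c
  else none

def pow2B (e : Int) : Option Int := if e < 0 then none else some ((2:Int) ^ e.toNat)

-- _run of Source B: consume the program two cells at a time, appending outputs
def runB (a b c : Int) (prog : List Int) (out : List Int) : Option (List Int) :=
  match prog with
  | op :: p :: rest =>
    if op = 0 then (comboB p a b c).bind fun v => (pow2B v).bind fun d => runB (PySem.Int.floordiv a d) b c rest out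
    else if op = 1 then runB a (PySem.Int.bxor b p) c rest out
    else if op = 2 then (comboB p a b c).bind fun v => runB a (PySem.Int.mod v 8) c rest out
    else if op = 4 then runB a (PySem.Int.bxor b c) c rest out
    else if op = 5 then (comboB p a b c).bind fun v => runB a b c rest (out ++ [PySem.Int.mod v 8])
    else if op = 6 then (comboB p a b c).bind fun v => (pow2B v).bind fun d => runB a (PySem.Int.floordiv a d) c rest out
    else if op = 7 then (comboB p a b c).bind fun v => (pow2B v).bind fun d => runB a b (PySem.Int.floordiv a d) rest out
    else runB a b c rest out
  | _ => some out

-- the comprehension's condition: _run(x, tape)[0] == t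
def matchB (tape : List Int) (x t : Int) : Bool :=
  ((runB x 0 0 tape []).bind fun r => PySem.List.pyGet? r 0) == some t

-- check_head of Source B: level-by-level scan over the digits of head (back to front)
def check_head_alt (a : Int) (tape : List Int) (head : List Int) : Bool × Int :=
  let final := head.reverse.foldl
    (fun level t => level.flatMap fun acc =>
      ((PySem.List.pyRange 0 8 1).filter (fun i => matchB tape (8*acc+i) t)).map (fun i => 8*acc+i))
    [a]
  match final with
  | [] => (false, -1)
  | x :: _ => (true, x)

-- ===== PRECONDITION & SPEC =====
-- Pre_ excludes inputs (with head ≠ []) on which the interpreter raises (odd-length tape,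
-- an invalid combo param, no output instruction for run(...)[0]) and inputs on which a
-- register would become a Python float via 2**(negative register), whose float arithmetic
-- an integer port cannot represent.
def Pre_check_head (a : Int) (tape : List Int) (head : List Int) : Prop :=
  head = [] ∨
    (tape.length % 2 = 0 ∧
     (∀ j < tape.length / 2,
        (tape.getD (2*j) 0 = 0 ∨ tape.getD (2*j) 0 = 2 ∨ tape.getD (2*j) 0 = 5 ∨
         tape.getD (2*j) 0 = 6 ∨ tape.getD (2*j) 0 = 7) →
        0 ≤ tape.getD (2*j+1) 0 ∧ tape.getD (2*j+1) 0 ≤ 6) ∧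
     (∃ j < tape.length / 2, tape.getD (2*j) 0 = 5) ∧
     ((∀ j < tape.length / 2,
         (tape.getD (2*j) 0 = 0 ∨ tape.getD (2*j) 0 = 6 ∨ tape.getD (2*j) 0 = 7) →
         tape.getD (2*j+1) 0 ≤ 3) ∨
      (0 ≤ a ∧ ∀ j < tape.length / 2, tape.getD (2*j) 0 = 1 → 0 ≤ tape.getD (2*j+1) 0)))

instance (a : Int) (tape : List Int) (head : List Int) : Decidable (Pre_check_head a tape head) := by
  unfold Pre_check_head; infer_instance

def pvWitness_check_head : Int × List Int × List Int := (0, [5, 4], [1])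

def Spec_check_head (a : Int) (tape : List Int) (head : List Int) (out : Bool × Int) : Prop := out = check_head_alt a tape head
instance (a : Int) (tape : List Int) (head : List Int) (out : Bool × Int) : Decidable (Spec_check_head a tape head out) := by unfold Spec_check_head; infer_instance

-- ===== CLAIM (what is proved, stated in full; the proofs are below) =====
def Claim_equal_check_head : Prop := ∀ (a : Int) (tape : List Int) (head : List Int), Dom_check_head a tape head → Pre_check_head a tape head → Spec_check_head a tape head (check_head a tape head)

-- ===== LEMMAS AND PROOFS =====

theorem pow2B_eq_pow2A (e : Int) : pow2B e = pow2A e := rfl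

theorem comboB_eq_comboA (p a b c : Int) : comboB p a b c = comboA a b c p := by
  unfold comboA comboB
  split_ifs <;> first | rfl | omega

-- runB on the tail of tape computes runA's result with the accumulator appended in front
theorem runB_eq_runA (tape : List Int) (hlen : tape.length % 2 = 0) :
    ∀ (n i : Nat) (a b c : Int) (out : List Int), tape.length - i ≤ n → i % 2 = 0 →
      runB a b c (tape.drop i) out = (runA tape a b c i).map (out ++ ·) := by
  intro n
  induction n with
  | zero =>
    intro i a b c out h1 h2
    have hle : tape.length ≤ i := by omega
    rw [List.drop_eq_nil_of_le hle, runA]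
    simp [hle, runB]
  | succ n ih =>
    intro i a b c out h1 h2
    by_cases hle : tape.length ≤ i
    · rw [List.drop_eq_nil_of_le hle, runA]
      simp [hle, runB]
    · replace hle : i < tape.length := by omega
      have hi1 : i + 1 < tape.length := by omega
      rw [List.drop_eq_getElem_cons (by omega), List.drop_eq_getElem_cons hi1, runA]
      rw [List.getElem?_eq_getElem (by omega : i < tape.length), List.getElem?_eq_getElem hi1]
      simp only [dif_neg (by omega : ¬ tape.length ≤ i)]
      rw [runB]
      simp only [comboB_eq_comboA, pow2B_eq_pow2A]
      have harr : i + 1 + 1 = i + 2 := by omega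
      rw [harr]
      have ih2 := fun a b c out => ih (i+2) a b c out (by omega) (by omega)
      split_ifs <;>
        first
        | exact ih2 _ _ _ _
        | (exfalso; omega)
        | (rcases hc : comboA a b c tape[i+1] with _ | v <;>
           simp only [Option.bind_none, Option.bind_some] <;>
           first
           | simpa using ih2 _ _ _ _
           | (simp; done)
           | (rcases hp : pow2A v with _ | d <;>
              simp only [Option.bind_none, Option.bind_some] <;>
              first
              | simpa using ih2 _ _ _ _
              | (simp; done))
           | (rw [ih2]; cases runA tape a b c (i+2) <;> simp))

def firstLeaf : List Int → Bool × Int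
  | [] => (false, -1)
  | x :: _ => (true, x)

-- the DFS-ordered list of surviving accumulators after processing the target list ts
def leavesL (tape : List Int) : List Int → Int → List Int
  | [], a => [a]
  | t :: ts, a =>
    (((PySem.List.pyRange 0 8 1).filter (fun i => matchB tape (8*a+i) t)).map (fun i => 8*a+i)).flatMap
      (fun x => leavesL tape ts x)

-- B's level fold flattens to the DFS leaf list
theorem foldl_eq_leavesL (tape : List Int) :
    ∀ (ts level : List Int),
      ts.foldl
        (fun level t => level.flatMap fun acc =>
          ((PySem.List.pyRange 0 8 1).filter (fun i => matchB tape (8*acc+i) t)).map (fun i => 8*acc+i))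
        level
      = level.flatMap (fun a => leavesL tape ts a) := by
  intro ts
  induction ts with
  | nil => intro level; simp [leavesL, List.flatMap_singleton']
  | cons t ts ih =>
    intro level
    rw [List.foldl_cons, ih, List.flatMap_assoc]
    simp only [leavesL]

theorem checkLoop_char (tape : List Int) (hlen : tape.length % 2 = 0) (t : Int) (ts' : List Int)
    (hIH : ∀ a, check_head a tape ts'.reverse = firstLeaf (leavesL tape ts' a)) :
    ∀ (cands : List Int) (a : Int),
      checkLoop a tape (ts'.reverse ++ [t]) cands =
        firstLeaf (((cands.filter (fun i => matchB tape (8*a+i) t)).map (fun i => 8*a+i)).flatMap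
          (fun x => leavesL tape ts' x)) := by
  have runA0 : ∀ x : Int, runA tape x 0 0 0 = runB x 0 0 tape [] := by
    intro x
    have h := runB_eq_runA tape hlen tape.length 0 x 0 0 [] (by omega) (by omega)
    simp only [List.drop_zero, List.nil_append] at h
    cases hr : runA tape x 0 0 0 <;> simp [hr] at h ⊢ <;> simp [h]
  intro cands
  induction cands with
  | nil => intro a; simp [checkLoop, firstLeaf]
  | cons i rest ih =>
    intro a
    have hne : ts'.reverse ++ [t] ≠ [] := by simp
    simp only [checkLoop]
    rw [dif_neg hne, PySem.List.pyGet?_neg_one_append_singleton, runA0,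
        PySem.List.slice_to_neg_one, List.dropLast_concat]
    by_cases hm : matchB tape (8*a+i) t
    · have hcond : ((runB (8*a+i) 0 0 tape []).bind fun r => PySem.List.pyGet? r 0) = some t := by
        simpa [matchB] using hm
      rw [if_pos hcond, hIH (8*a+i)]
      simp only [List.filter_cons]
      rw [if_pos hm]
      simp only [List.map_cons, List.flatMap_cons]
      cases hl : leavesL tape ts' (8*a+i) with
      | nil => simp [firstLeaf, ih a]
      | cons x xs => simp [firstLeaf]
    · have hcond : ¬ (((runB (8*a+i) 0 0 tape []).bind fun r => PySem.List.pyGet? r 0) = some t) := by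
        simpa [matchB] using hm
      rw [if_neg hcond]
      simp only [List.filter_cons]
      rw [if_neg hm]
      exact ih a

theorem check_head_char (tape : List Int) (hlen : tape.length % 2 = 0) :
    ∀ (ts : List Int) (a : Int), check_head a tape ts.reverse = firstLeaf (leavesL tape ts a) := by
  intro ts
  induction ts with
  | nil => intro a; simp [check_head, leavesL, firstLeaf]
  | cons t ts' ih =>
    intro a
    rw [List.reverse_cons, check_head]
    rw [if_neg (by simp)]
    rw [checkLoop_char tape hlen t ts' ih (PySem.List.pyRange 0 8 1) a]
    simp only [leavesL]

-- ===== VERDICT (by name: the statement is the Claim_ definition above) =====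
theorem check_head_spec : Claim_equal_check_head := by
  intro a tape head hdom hpre
  unfold Spec_check_head
  by_cases hh : head = []
  · subst hh
    simp [check_head, check_head_alt]
  · have hlen : tape.length % 2 = 0 := by
      rcases hpre with h | h
      · exact absurd h hh
      · exact h.1
    have hA := check_head_char tape hlen head.reverse a
    rw [List.reverse_reverse] at hA
    rw [hA]
    simp only [check_head_alt]
    rw [foldl_eq_leavesL tape head.reverse [a]]
    simp only [List.flatMap_cons, List.flatMap_nil, List.append_nil]
    cases leavesL tape head.reverse a <;> simp [firstLeaf]
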